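-- pv_equiv track=rewrite | github.com/edchengg/easyproject | ner/decode_marker_conll.py | merge_adjacent_identical_numbers
-- ===== SOURCE A (Python) =====
-- import itertools
--
-- def merge_adjacent_identical_numbers(number_list):
--     '''
--     Merge adjacent identical elements in to a sublist.
--     Input:
--         a number list.
--         [1, 1, 1, 1, 1, 1, 1, 1, 1, 1, 0, 1, 1, 1, 1, 1, 1, 1, 1, 0, 1, 1, 1, 0, 1, 1, 0]
--     Output:
--         grouped list: [[1, 1, 1, 1, 1, 1, 1, 1, 1, 1], [0], [1, 1, 1, 1, 1, 1, 1, 1], [0], [1, 1, 1], [0], [1, 1], [0]]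
--         a list of 3-element tuples, (start_idx, end_idx, duplicated_element).
--         [[0, 10, 1], [10, 11, 0], [11, 19, 1], [19, 20, 0], [20, 23, 1], [23, 24, 0], [24, 26, 1], [26, 27, 0]]
--
--     '''
--     U = []
--     key_func = lambda x: x
--     for key, group in itertools.groupby(number_list, key_func):
--         U.append(list(group))
--
--     begin_end_idx_list = []
--     count = 0
--     for i in U:
--         start_idx = count
--         for j in i:
--             count += 1
--         end_idx = count
--         begin_end_idx_list.append([start_idx, end_idx, i[0]])
--
--     return U, begin_end_idx_list
-- ===== SOURCE B (Python) =====
-- def merge_adjacent_identical_numbers(number_list):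
--     # Single fused pass: track the current run's start index and value,
--     # emitting both the group and its [start, end, value] record on each break.
--     U = []
--     begin_end_idx_list = []
--     if not number_list:
--         return U, begin_end_idx_list
--     start = 0
--     v = number_list[0]
--     run = [v]
--     for i in range(1, len(number_list)):
--         x = number_list[i]
--         if x == v:
--             run.append(x)
--         else:
--             U.append(run)
--             begin_end_idx_list.append([start, i, v])
--             start = i
--             v = x
--             run = [x]
--     U.append(run)
--     begin_end_idx_list.append([start, len(number_list), v])
--     return U, begin_end_idx_list
-- ===== Notes on version B (the rewrite author's own statement) =====
-- stated objective: alternative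
-- what changed: Replaces the two-pass groupby-then-reindex pipeline (itertools.groupby builds U, then a second nested loop recounts lengths element by element for the index triples) with one fused indexed loop that builds both the group list and the [start, end, value] records in a single traversal.
import Mathlib
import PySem

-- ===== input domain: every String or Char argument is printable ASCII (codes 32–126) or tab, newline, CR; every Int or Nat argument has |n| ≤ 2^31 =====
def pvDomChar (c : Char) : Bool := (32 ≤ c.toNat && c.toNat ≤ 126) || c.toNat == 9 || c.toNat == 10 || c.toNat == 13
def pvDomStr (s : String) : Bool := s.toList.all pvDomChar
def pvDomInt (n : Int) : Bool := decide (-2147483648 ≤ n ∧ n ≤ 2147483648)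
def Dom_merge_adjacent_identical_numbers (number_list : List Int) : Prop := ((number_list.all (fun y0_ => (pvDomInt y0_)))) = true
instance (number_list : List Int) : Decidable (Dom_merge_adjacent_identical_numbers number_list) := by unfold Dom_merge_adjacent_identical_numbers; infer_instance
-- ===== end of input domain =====

-- B fuses A's groupby-then-reindex two passes into one indexed loop; alternative decomposition, same O(n) cost.

-- ===== PORT A =====
-- helper modelling itertools.groupby's advance: split off the maximal prefix equal to v
def pvTakeRun (v : Int) : List Int → List Int × List Int
  | [] => ([], [])
  | x :: xs =>
    if x = v then
      let p := pvTakeRun v xs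
      (x :: p.1, p.2)
    else ([], x :: xs)

theorem pvTakeRun_snd_length (v : Int) : ∀ l : List Int, (pvTakeRun v l).2.length ≤ l.length
  | [] => Nat.le_refl _
  | x :: xs => by
    simp only [pvTakeRun]
    split
    · exact Nat.le_succ_of_le (pvTakeRun_snd_length v xs)
    · exact Nat.le_refl _

-- first loop of A: U collected from itertools.groupby with the identity key
def pvGroupby : List Int → List (List Int)
  | [] => []
  | x :: xs => (x :: (pvTakeRun x xs).1) :: pvGroupby (pvTakeRun x xs).2
termination_by l => l.length
decreasing_by
  simpa using Nat.lt_succ_of_le (pvTakeRun_snd_length x xs)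

def merge_adjacent_identical_numbers (number_list : List Int) : List (List Int) × List (List Int) :=
  let U := pvGroupby number_list
  -- second loop of A: running count; i[0] written as headD 0 (groupby's groups are nonempty, so i[0] never raises)
  let r := U.foldl (fun acc i =>
    let start_idx := acc.2
    let count := i.foldl (fun c _ => c + 1) acc.2
    (acc.1 ++ [[start_idx, count, i.headD 0]], count)) (([] : List (List Int)), (0 : Int))
  (U, r.1)

-- ===== PORT B =====
-- B's single fused loop: v = current run value, start = run's start index, i = current index
def pvAltGo (v start i : Int) (run : List Int) (U idx : List (List Int)) : List Int → List (List Int) × List (List Int)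
  | [] => (U ++ [run], idx ++ [[start, i, v]])
  | x :: xs =>
    if x = v then pvAltGo v start (i + 1) (run ++ [x]) U idx xs
    else pvAltGo x i (i + 1) [x] (U ++ [run]) (idx ++ [[start, i, v]]) xs

def merge_adjacent_identical_numbers_alt : List Int → List (List Int) × List (List Int)
  | [] => ([], [])
  | x :: xs => pvAltGo x 0 1 [x] [] [] xs

-- ===== PRECONDITION & SPEC =====
def Spec_merge_adjacent_identical_numbers (number_list : List Int) (out : List (List Int) × List (List Int)) : Prop := out = merge_adjacent_identical_numbers_alt number_list
instance (number_list : List Int) (out : List (List Int) × List (List Int)) : Decidable (Spec_merge_adjacent_identical_numbers number_list out) := by unfold Spec_merge_adjacent_identical_numbers; infer_instance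

-- ===== CLAIM (what is proved, stated in full; the proofs are below) =====
def Claim_equal_merge_adjacent_identical_numbers : Prop := ∀ (number_list : List Int), Dom_merge_adjacent_identical_numbers number_list → Spec_merge_adjacent_identical_numbers number_list (merge_adjacent_identical_numbers number_list)

-- ===== LEMMAS AND PROOFS =====

-- common target: index triples of a group list, with running offset c
def pvMkIdx : List (List Int) → Int → List (List Int)
  | [], _ => []
  | g :: gs, c => [c, c + (g.length : Int), g.headD 0] :: pvMkIdx gs (c + (g.length : Int))

theorem pv_count_foldl (i : List Int) : ∀ s : Int, i.foldl (fun c _ => c + 1) s = s + (i.length : Int) := by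
  induction i with
  | nil => intro s; simp
  | cons x xs ih => intro s; simp [List.foldl, ih]; ring

theorem pv_foldA (U : List (List Int)) : ∀ (P : List (List Int)) (c : Int),
    (U.foldl (fun acc i =>
      let start_idx := acc.2
      let count := i.foldl (fun c _ => c + 1) acc.2
      (acc.1 ++ [[start_idx, count, i.headD 0]], count)) (P, c)).1 = P ++ pvMkIdx U c := by
  induction U with
  | nil => intro P c; simp [pvMkIdx]
  | cons g gs ih =>
    intro P c
    simp only [List.foldl_cons]
    rw [pv_count_foldl, ih]
    simp [pvMkIdx]

theorem pvAltGo_eq : ∀ (l : List Int) (v start : Int) (t : List Int) (U idx : List (List Int)),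
    pvAltGo v start (start + ((v :: t).length : Int)) (v :: t) U idx l =
      (U ++ ((v :: t) ++ (pvTakeRun v l).1) :: pvGroupby (pvTakeRun v l).2,
       idx ++ pvMkIdx (((v :: t) ++ (pvTakeRun v l).1) :: pvGroupby (pvTakeRun v l).2) start) := by
  intro l
  induction l with
  | nil =>
    intro v start t U idx
    simp [pvAltGo, pvTakeRun, pvGroupby, pvMkIdx]
  | cons x xs ih =>
    intro v start t U idx
    by_cases hx : x = v
    · subst hx
      have h1 : start + (((x :: t) : List Int).length : Int) + 1
          = start + (((x :: (t ++ [x])) : List Int).length : Int) := by simp; ring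
      have h2 : (x :: t) ++ [x] = x :: (t ++ [x]) := by simp
      simp only [pvAltGo, if_true]
      rw [h1, h2, ih]
      simp [pvTakeRun, pvMkIdx]
    · have hi : start + (((v :: t) : List Int).length : Int) + 1
          = (start + (((v :: t) : List Int).length : Int)) + ((([x]) : List Int).length : Int) := by
        simp
      simp only [pvAltGo, if_neg hx]
      rw [hi, ih]
      simp [pvTakeRun, hx, pvGroupby, pvMkIdx]

-- ===== VERDICT (by name: the statement is the Claim_ definition above) =====
theorem merge_adjacent_identical_numbers_spec : Claim_equal_merge_adjacent_identical_numbers := by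
  intro l _
  unfold Spec_merge_adjacent_identical_numbers
  cases l with
  | nil =>
    simp [merge_adjacent_identical_numbers, merge_adjacent_identical_numbers_alt, pvGroupby]
  | cons x xs =>
    have hB := pvAltGo_eq xs x 0 [] [] []
    have h1 : (0 : Int) + (((x :: ([] : List Int)) : List Int).length : Int) = 1 := by simp
    rw [h1] at hB
    show merge_adjacent_identical_numbers (x :: xs) = pvAltGo x 0 1 [x] [] [] xs
    rw [hB]
    simp only [merge_adjacent_identical_numbers, pv_foldA]
    simp [pvGroupby]
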